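-- pv_equiv track=rewrite | github.com/yongkangc/nlp-from-scratch | optimized_hmm_chunker.py | estimate_emission_params
-- ===== SOURCE A (Python) =====
-- from collections import Counter, defaultdict
--
-- def estimate_emission_params(modified_sentences):
--     """
--     Estimate emission parameters from the modified training data.
--     """
--     tag_count = defaultdict(int)
--     word_tag_count = defaultdict(lambda: defaultdict(int))
--
--     for sentence in modified_sentences:
--         for word, tag in sentence:
--             tag_count[tag] += 1
--             word_tag_count[tag][word] += 1
--
--     return tag_count, word_tag_count
-- ===== SOURCE B (Python) =====
-- from collections import Counter, defaultdict
--
-- def estimate_emission_params(modified_sentences):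
--     """
--     Estimate emission parameters from the modified training data.
--     """
--     pairs = [(tag, word) for sentence in modified_sentences for word, tag in sentence]
--     tag_count = defaultdict(int, Counter(tag for tag, _ in pairs))
--     pair_count = Counter(pairs)
--     word_tag_count = defaultdict(lambda: defaultdict(int))
--     for (tag, word), n in pair_count.items():
--         word_tag_count[tag][word] = n
--     return tag_count, word_tag_count
-- ===== Notes on version B (the rewrite author's own statement) =====
-- stated objective: alternative
-- what changed: B flattens the corpus into a flat (tag, word) pair list, builds bulk Counters over the tags and over the pairs, and then reconstructs the nested word_tag_count table from the pair Counter's items, instead of A's per-token incremental updates of both nested dicts.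
import Mathlib
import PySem

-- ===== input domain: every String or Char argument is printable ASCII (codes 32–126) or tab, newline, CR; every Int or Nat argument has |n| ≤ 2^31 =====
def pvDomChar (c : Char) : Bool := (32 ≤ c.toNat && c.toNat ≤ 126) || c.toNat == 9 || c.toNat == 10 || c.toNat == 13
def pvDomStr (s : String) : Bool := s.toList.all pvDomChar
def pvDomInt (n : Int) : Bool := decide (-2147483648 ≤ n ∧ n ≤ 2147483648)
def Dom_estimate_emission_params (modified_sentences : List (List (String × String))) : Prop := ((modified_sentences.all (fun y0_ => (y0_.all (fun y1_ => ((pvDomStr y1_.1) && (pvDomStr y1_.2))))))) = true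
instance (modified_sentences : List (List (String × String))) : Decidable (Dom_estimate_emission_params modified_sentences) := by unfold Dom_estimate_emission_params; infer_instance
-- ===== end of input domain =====

-- B flattens the corpus into (tag, word) pairs, builds Counters of tags and of pairs in
-- bulk, and reconstructs the nested emission table from the pair Counter's items,
-- instead of A's per-token incremental updates of both dicts (alternative, same cost).

-- ===== PORT A =====
def estimate_emission_params (modified_sentences : List (List (String × String))) : (List (String × Int)) × (List (String × List (String × Int))) :=
  let st :=
    modified_sentences.foldl
      (fun st sentence =>
        sentence.foldl
          (fun (st : PySem.Dict String Int × PySem.Dict String (PySem.Dict String Int)) wt =>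
            (st.1.modify wt.2 0 (· + 1),
             st.2.modify wt.2 PySem.Dict.empty (fun d => d.modify wt.1 0 (· + 1))))
          st)
      (PySem.Dict.empty, PySem.Dict.empty)
  (st.1.items, st.2.items.map (fun p => (p.1, p.2.items)))

-- ===== PORT B =====
def estimate_emission_params_alt (modified_sentences : List (List (String × String))) : (List (String × Int)) × (List (String × List (String × Int))) :=
  let pairs := modified_sentences.flatMap (fun sentence => sentence.map (fun wt => (wt.2, wt.1)))
  let tag_count := PySem.Dict.counter (pairs.map Prod.fst)
  let pair_count := PySem.Dict.counter pairs
  let wtc :=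
    pair_count.items.foldl
      (fun (w : PySem.Dict String (PySem.Dict String Int)) p =>
        w.modify p.1.1 PySem.Dict.empty (fun d => d.insert p.1.2 p.2))
      PySem.Dict.empty
  (tag_count.items, wtc.items.map (fun p => (p.1, p.2.items)))

-- ===== PRECONDITION & SPEC =====
def Spec_estimate_emission_params (modified_sentences : List (List (String × String))) (out : (List (String × Int)) × (List (String × List (String × Int)))) : Prop := out = estimate_emission_params_alt modified_sentences
instance (modified_sentences : List (List (String × String))) (out : (List (String × Int)) × (List (String × List (String × Int)))) : Decidable (Spec_estimate_emission_params modified_sentences out) := by unfold Spec_estimate_emission_params; infer_instance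

-- ===== CLAIM (what is proved, stated in full; the proofs are below) =====
def Claim_equal_estimate_emission_params : Prop := ∀ (modified_sentences : List (List (String × String))), Dom_estimate_emission_params modified_sentences → Spec_estimate_emission_params modified_sentences (estimate_emission_params modified_sentences)

-- ===== LEMMAS AND PROOFS =====

-- the token step of A on the nested word_tag_count dict
def pvStepW (w : PySem.Dict String (PySem.Dict String Int)) (wt : String × String) : PySem.Dict String (PySem.Dict String Int) :=
  w.modify wt.2 PySem.Dict.empty (fun d => d.modify wt.1 0 (· + 1))

-- reading one key of a keyed-modify fold = a fold over the matching sublist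
lemma pv_getD_foldl_modify_key {β ν : Type} (l : List β) (key : β → String)
    (f : β → ν → ν) (w0 : PySem.Dict String ν) (d0 : ν) (t : String) :
    (l.foldl (fun w b => w.modify (key b) d0 (f b)) w0).getD t d0
      = (l.filter (fun b => key b == t)).foldl (fun d b => f b d) (w0.getD t d0) := by
  induction l generalizing w0 with
  | nil => rfl
  | cons b l ih =>
    rw [List.foldl_cons, ih]
    by_cases h : key b = t
    · simp [h]
    · simp [h, PySem.Dict.getD_modify, Ne.symm h]

-- ordered dedup commutes with filter
lemma pv_ofList_filter {α : Type} [BEq α] [LawfulBEq α] (p : α → Bool) (xs : List α) :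
    PySem.Set.ofList (xs.filter p) = (PySem.Set.ofList xs).filter p := by
  induction xs with
  | nil => rfl
  | cons x xs ih =>
    by_cases h : p x
    · rw [List.filter_cons_of_pos h, PySem.Set.ofList_cons, PySem.Set.ofList_cons, ih,
        List.filter_cons_of_pos h]
      simp only [PySem.Set.discard, List.filter_filter]
      congr 1
      apply List.filter_congr
      intro y _
      rw [Bool.and_comm]
    · rw [List.filter_cons_of_neg h, PySem.Set.ofList_cons, ih, List.filter_cons_of_neg h]
      simp only [PySem.Set.discard, List.filter_filter]
      apply List.filter_congr
      intro y _
      cases hy : p y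
      · simp
      · have hyx : y ≠ x := fun he => h (he ▸ hy)
        simp [hyx]

-- ordered dedup commutes with an injective map
lemma pv_ofList_map_inj {α β : Type} [BEq α] [LawfulBEq α] [BEq β] [LawfulBEq β]
    (f : α → β) (hf : Function.Injective f) (xs : List α) :
    PySem.Set.ofList (xs.map f) = (PySem.Set.ofList xs).map f := by
  induction xs with
  | nil => rfl
  | cons x xs ih =>
    rw [List.map_cons, PySem.Set.ofList_cons, PySem.Set.ofList_cons, ih, List.map_cons]
    congr 1
    simp only [PySem.Set.discard, List.filter_map]
    congr 1
    apply List.filter_congr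
    intro y _
    simp [hf.eq_iff]

-- dedup of a mapped dedup = dedup of the map
lemma pv_ofList_ofList_map {α β : Type} [BEq α] [LawfulBEq α] [BEq β] [LawfulBEq β]
    (f : α → β) (xs : List α) :
    PySem.Set.ofList ((PySem.Set.ofList xs).map f) = PySem.Set.ofList (xs.map f) := by
  induction xs using List.reverseRecOn with
  | nil => rfl
  | append_singleton xs x ih =>
    rw [PySem.Set.ofList_append_singleton, List.map_append, List.map_singleton,
      PySem.Set.ofList_append_singleton, ← ih, PySem.Set.add_eq_ite]
    by_cases h : x ∈ PySem.Set.ofList xs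
    · rw [if_pos h, PySem.Set.add_eq_ite, if_pos]
      exact (PySem.Set.mem_ofList _ _).mpr (List.mem_map.mpr ⟨x, h, rfl⟩)
    · rw [if_neg h, List.map_append, List.map_singleton, PySem.Set.ofList_append_singleton]

-- counting a swapped pair = counting the word among tokens carrying that tag
lemma pv_count_pair (l : List (String × String)) (t w : String) :
    (l.map (fun wt => (wt.2, wt.1))).count (t, w)
      = ((l.filter (fun wt => wt.2 == t)).map Prod.fst).count w := by
  induction l with
  | nil => rfl
  | cons p l ih =>
    by_cases h1 : p.2 = t <;> by_cases h2 : p.1 = w <;>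
      simp [h1, h2, ih, Prod.ext_iff]

-- the flat (tag, word) pair list of B, over the flattened token list
lemma pv_pairs_eq (ms : List (List (String × String))) :
    ms.flatMap (fun sentence => sentence.map (fun wt => (wt.2, wt.1)))
      = (ms.flatten).map (fun wt => (wt.2, wt.1)) := by
  rw [List.flatMap_def, List.map_flatten]

-- the filtered swapped pairs with tag t, as (t, ·) over the words carrying tag t
lemma pv_pairs_filter (l : List (String × String)) (t : String) :
    ((l.map (fun wt => (wt.2, wt.1))).filter (fun q => q.1 == t))
      = ((l.filter (fun wt => wt.2 == t)).map Prod.fst).map (fun w => (t, w)) := by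
  rw [List.filter_map, List.map_map]
  show (l.filter (fun wt => wt.2 == t)).map (fun wt => (wt.2, wt.1)) = _
  apply List.map_congr_left
  intro wt hwt
  have : wt.2 = t := by simpa using (List.mem_filter.mp hwt).2
  simp [Function.comp, this]

-- inner dicts agree: A's incremental word counter for tag t = B's reconstruction
lemma pv_inner_eq (l : List (String × String)) (t : String) :
    (l.foldl pvStepW PySem.Dict.empty).getD t PySem.Dict.empty
      = ((PySem.Dict.counter (l.map (fun wt => (wt.2, wt.1)))).items.foldl
          (fun (w : PySem.Dict String (PySem.Dict String Int)) p =>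
            w.modify p.1.1 PySem.Dict.empty (fun d => d.insert p.1.2 p.2))
          PySem.Dict.empty).getD t PySem.Dict.empty := by
  have hA := pv_getD_foldl_modify_key l (fun wt => wt.2)
      (fun wt (d : PySem.Dict String Int) => d.modify wt.1 0 (· + 1)) PySem.Dict.empty PySem.Dict.empty t
  have hstA : (fun (w : PySem.Dict String (PySem.Dict String Int)) b => w.modify b.2 PySem.Dict.empty
      (fun d => d.modify b.1 0 (· + 1))) = pvStepW := rfl
  rw [hstA] at hA
  have hB := pv_getD_foldl_modify_key (PySem.Dict.counter (l.map (fun wt => (wt.2, wt.1)))).items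
      (fun p => p.1.1)
      (fun p (d : PySem.Dict String Int) => d.insert p.1.2 p.2) PySem.Dict.empty PySem.Dict.empty t
  rw [hA, hB, PySem.Dict.getD_empty]
  rw [PySem.Dict.items_counter, List.filter_map]
  have hcomp : ((fun (b : (String × String) × Int) => b.1.1 == t) ∘
      (fun k : String × String => (k, ((l.map (fun wt => (wt.2, wt.1))).count k : Int))))
      = (fun q : String × String => q.1 == t) := rfl
  rw [hcomp, ← pv_ofList_filter, pv_pairs_filter,
    pv_ofList_map_inj (fun w => (t, w)) (fun a b h => by simpa using h), List.map_map]
  have hAc : (l.filter (fun wt => wt.2 == t)).foldl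
      (fun (d : PySem.Dict String Int) wt => d.modify wt.1 0 (· + 1)) PySem.Dict.empty
      = PySem.Dict.counter ((l.filter (fun wt => wt.2 == t)).map Prod.fst) := by
    rw [PySem.Dict.counter_eq_foldl, List.foldl_map]
  rw [hAc]
  apply PySem.Dict.ext
  have hfresh := PySem.Dict.items_foldl_insert_fresh
      ((PySem.Set.ofList ((l.filter (fun wt => wt.2 == t)).map Prod.fst)).map
        ((fun k : String × String => (k, ((l.map (fun wt => (wt.2, wt.1))).count k : Int))) ∘ (fun w => (t, w))))
      (fun a => a.1.2) (fun a => a.2) (PySem.Dict.empty : PySem.Dict String Int)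
      (fun a _ => by simp [PySem.Dict.contains_empty]) ?_
  · have hemp : (PySem.Dict.empty : PySem.Dict String Int).items = [] := rfl
    rw [hfresh, hemp, List.nil_append, PySem.Dict.items_counter, List.map_map]
    apply List.map_congr_left
    intro w hw
    simp [Function.comp, pv_count_pair l t w]
  · rw [List.map_map]
    have hid : ((fun (a : (String × String) × Int) => a.1.2) ∘
        ((fun k : String × String => (k, ((l.map (fun wt => (wt.2, wt.1))).count k : Int))) ∘ (fun w => (t, w)))) = id := rfl
    rw [hid, List.map_id]
    exact PySem.Set.nodup_ofList _

theorem pv_main (ms : List (List (String × String))) :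
    estimate_emission_params ms = estimate_emission_params_alt ms := by
  simp only [estimate_emission_params, estimate_emission_params_alt]
  rw [pv_pairs_eq]
  have hnest : ∀ (f : (PySem.Dict String Int × PySem.Dict String (PySem.Dict String Int)) → (String × String) → _) b,
      ms.foldl (fun st sentence => sentence.foldl f st) b = (ms.flatten).foldl f b :=
    fun f b => (List.foldl_flatten).symm
  rw [hnest]
  rw [PySem.List.foldl_prod_mk
      (fun (d : PySem.Dict String Int) (wt : String × String) => d.modify wt.2 0 (· + 1))
      (fun (w : PySem.Dict String (PySem.Dict String Int)) (wt : String × String) =>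
        w.modify wt.2 PySem.Dict.empty (fun d => d.modify wt.1 0 (· + 1)))]
  set l := ms.flatten with hl
  rw [Prod.mk.injEq]
  refine ⟨?_, ?_⟩
  · -- tag counts: A's incremental counter = B's Counter over the pair tags
    show (l.foldl (fun (d : PySem.Dict String Int) (wt : String × String) => d.modify wt.2 0 (· + 1)) PySem.Dict.empty).items = _
    have hmf : (l.map (fun wt => (wt.2, wt.1))).map Prod.fst = l.map (fun wt => wt.2) := by
      rw [List.map_map]; rfl
    rw [hmf, PySem.Dict.counter_eq_foldl, List.foldl_map]
  · -- nested word-tag counts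
    show ((l.foldl (fun (w : PySem.Dict String (PySem.Dict String Int)) (wt : String × String) =>
        w.modify wt.2 PySem.Dict.empty (fun d => d.modify wt.1 0 (· + 1))) PySem.Dict.empty).items).map _ = _
    have hstA : (fun (w : PySem.Dict String (PySem.Dict String Int)) (wt : String × String) =>
        w.modify wt.2 PySem.Dict.empty (fun d => d.modify wt.1 0 (· + 1))) = pvStepW := rfl
    rw [hstA]
    set wtcA := l.foldl pvStepW PySem.Dict.empty with hA
    set wtcB := (PySem.Dict.counter (l.map (fun wt => (wt.2, wt.1)))).items.foldl
      (fun (w : PySem.Dict String (PySem.Dict String Int)) p =>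
        w.modify p.1.1 PySem.Dict.empty (fun d => d.insert p.1.2 p.2)) PySem.Dict.empty with hB
    have hkA : wtcA.keys = PySem.Set.ofList (l.map (fun wt : String × String => wt.2)) := by
      rw [hA]
      have := PySem.Dict.keys_foldl_modify_key l (fun wt : String × String => wt.2)
        (PySem.Dict.empty : PySem.Dict String Int)
        (fun _ (wt : String × String) (d : PySem.Dict String Int) => d.modify wt.1 0 (· + 1)) PySem.Dict.empty
      simpa [pvStepW, PySem.Set.update_nil_left, PySem.Dict.keys_empty] using this
    have hkB : wtcB.keys = PySem.Set.ofList (l.map (fun wt : String × String => wt.2)) := by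
      rw [hB]
      have hk := PySem.Dict.keys_foldl_modify_key (PySem.Dict.counter (l.map (fun wt => (wt.2, wt.1)))).items
        (fun p : (String × String) × Int => p.1.1)
        (PySem.Dict.empty : PySem.Dict String Int)
        (fun _ (p : (String × String) × Int) (d : PySem.Dict String Int) => d.insert p.1.2 p.2) PySem.Dict.empty
      rw [hk, PySem.Dict.keys_empty, PySem.Set.update_nil_left, PySem.Dict.items_counter, List.map_map]
      have h1 : ((fun p : (String × String) × Int => p.1.1) ∘
          (fun k : String × String => (k, ((l.map (fun wt => (wt.2, wt.1))).count k : Int)))) = Prod.fst := rfl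
      rw [h1, pv_ofList_ofList_map, List.map_map]
      rfl
    have hndA : wtcA.keys.Nodup := by
      rw [hA]
      exact PySem.Dict.nodup_keys_foldl_modify_key l (fun wt : String × String => wt.2)
        _ (fun _ (wt : String × String) (d : PySem.Dict String Int) => d.modify wt.1 0 (· + 1))
        PySem.Dict.empty (by simp [PySem.Dict.keys_empty])
    have hndB : wtcB.keys.Nodup := by
      rw [hB]
      exact PySem.Dict.nodup_keys_foldl_modify_key _ (fun p : (String × String) × Int => p.1.1)
        _ (fun _ (p : (String × String) × Int) (d : PySem.Dict String Int) => d.insert p.1.2 p.2)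
        PySem.Dict.empty (by simp [PySem.Dict.keys_empty])
    rw [PySem.Dict.items_eq_map_keys wtcA hndA PySem.Dict.empty,
      PySem.Dict.items_eq_map_keys wtcB hndB PySem.Dict.empty, hkA, hkB, List.map_map, List.map_map]
    apply List.map_congr_left
    intro t _
    have hinner := pv_inner_eq l t
    rw [← hA, ← hB] at hinner
    simp [Function.comp, hinner]

-- ===== VERDICT (by name: the statement is the Claim_ definition above) =====
theorem estimate_emission_params_spec : Claim_equal_estimate_emission_params := by
  intro ms _
  show _ = _
  exact pv_main ms
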